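-- pv_equiv track=rewrite | github.com/tuonglab/minigene_design | scripts/_utils.py | flanking_lower_positions
-- ===== SOURCE A (Python) =====
-- def flanking_lower_positions(string: str) -> tuple[int, int]:
--     """
--     Finds the number of lowercase characters to the left and right of the first and last uppercase characters, respectively.
--
--     Parameters
--     ----------
--     string : str
--         Input string.
--
--     Returns
--     -------
--     tuple[int, int]
--         Number of lowercase characters to the left and right of the first and last uppercase characters, respectively.
--     """
--     first_upper_index = None
--     last_upper_index = None
--
--     for i, char in enumerate(string):
--         if char.isupper():
--             if first_upper_index is None:
--                 first_upper_index = i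
--             last_upper_index = i
--
--     left_count = sum(1 for i in range(first_upper_index) if string[i].islower()) if first_upper_index is not None else 0
--     right_count = sum(1 for i in range(last_upper_index + 1, len(string)) if string[i].islower()) if last_upper_index is not None else 0
--
--     return left_count, right_count
-- ===== SOURCE B (Python) =====
-- def flanking_lower_positions(string: str) -> tuple[int, int]:
--     def lower_before_upper(s: str) -> int:
--         count = 0
--         for ch in s:
--             if ch.isupper():
--                 return count
--             if ch.islower():
--                 count += 1
--         return 0
--
--     return lower_before_upper(string), lower_before_upper(string[::-1])
-- ===== Notes on version B (the rewrite author's own statement) =====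
-- stated objective: simpler
-- what changed: Replaces the index-tracking enumerate pass plus two ranged re-scans by one reusable early-return scan (count lowercase until the first uppercase, 0 if none) applied to the string and to its reversal.
import Mathlib
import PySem

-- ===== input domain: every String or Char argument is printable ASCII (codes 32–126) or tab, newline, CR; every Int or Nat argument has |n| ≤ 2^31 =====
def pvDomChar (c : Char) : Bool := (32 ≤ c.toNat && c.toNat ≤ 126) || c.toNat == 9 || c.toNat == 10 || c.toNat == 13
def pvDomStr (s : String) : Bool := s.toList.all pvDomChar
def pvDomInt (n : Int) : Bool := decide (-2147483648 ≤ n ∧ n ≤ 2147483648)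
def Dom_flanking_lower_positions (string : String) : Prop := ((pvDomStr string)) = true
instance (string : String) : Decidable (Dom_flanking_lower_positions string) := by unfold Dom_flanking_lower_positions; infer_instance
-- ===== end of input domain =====

-- B replaces A's index tracking and ranged re-scans by one early-return scan applied to the
-- string and to its reversal (objective: simpler). Equivalence is on the return value.

-- ===== PORT A =====
-- the loop body of A's enumerate pass: state = (first_upper_index, last_upper_index)
def pvStepA (st : Option Int × Option Int) (p : Int × Char) : Option Int × Option Int :=
  if PySem.Chars.isupper p.2 then
    ((match st.1 with | none => some p.1 | some x => some x), some p.1)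
  else st

def flanking_lower_positions (string : String) : Int × Int :=
  let chars := string.toList
  let st := (PySem.List.enumerate chars 0).foldl pvStepA (none, none)
  -- sum(1 for i in range(first) if string[i].islower()); index i is always in range,
  -- so pyGetD with a dummy default is exact here
  let left : Int := match st.1 with
    | none => 0
    | some f => ((PySem.List.pyRange 0 f 1).map (fun i =>
        if PySem.Chars.islower (PySem.List.pyGetD chars i ' ') then (1:Int) else 0)).sum
  let right : Int := match st.2 with
    | none => 0
    | some lst => ((PySem.List.pyRange (lst+1) (chars.length : Int) 1).map (fun i =>
        if PySem.Chars.islower (PySem.List.pyGetD chars i ' ') then (1:Int) else 0)).sum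
  (left, right)

-- ===== PORT B =====
-- B's helper: count lowercase chars until the first uppercase; 0 if no uppercase occurs
def pvLowerBeforeUpper : List Char → Int → Int
  | [], _ => 0
  | c :: cs, count =>
    if PySem.Chars.isupper c then count
    else pvLowerBeforeUpper cs (count + if PySem.Chars.islower c then 1 else 0)

def flanking_lower_positions_alt (string : String) : Int × Int :=
  -- string[::-1] is the reversal (PySem.Str.slice?_none_none_neg_one)
  (pvLowerBeforeUpper string.toList 0, pvLowerBeforeUpper string.toList.reverse 0)

-- ===== PRECONDITION & SPEC =====
def Spec_flanking_lower_positions (string : String) (out : Int × Int) : Prop := out = flanking_lower_positions_alt string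
instance (string : String) (out : Int × Int) : Decidable (Spec_flanking_lower_positions string out) := by unfold Spec_flanking_lower_positions; infer_instance

-- ===== CLAIM (what is proved, stated in full; the proofs are below) =====
def Claim_equal_flanking_lower_positions : Prop := ∀ (string : String), Dom_flanking_lower_positions string → Spec_flanking_lower_positions string (flanking_lower_positions string)

-- ===== LEMMAS AND PROOFS =====

-- last uppercase index of a list, recursively
def pvLub : List Char → Option Nat
  | [] => none
  | c :: cs =>
    match pvLub cs with
    | some k => some (k + 1)
    | none => if PySem.Chars.isupper c then some 0 else none

theorem pvLub_none_iff (l : List Char) : pvLub l = none ↔ l.any PySem.Chars.isupper = false := by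
  induction l with
  | nil => simp [pvLub]
  | cons c cs ih =>
    simp only [pvLub, List.any_cons]
    cases h : pvLub cs with
    | some k => simp [h] at ih ⊢; simp [ih]
    | none => rw [ih] at h; by_cases hc : PySem.Chars.isupper c <;> simp [hc, h]

theorem pvFoldA (l : List Char) : ∀ (s : Int) (o1 o2 : Option Int),
    (PySem.List.enumerate l s).foldl pvStepA (o1, o2) =
      ((match o1 with
        | some x => some x
        | none => Option.map (fun k : Nat => s + (k : Int)) (l.findIdx? PySem.Chars.isupper)),
       (match pvLub l with
        | some k => some (s + (k : Int))
        | none => o2)) := by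
  induction l with
  | nil => intro s o1 o2; simp [PySem.List.enumerate_nil, pvLub]; cases o1 <;> simp
  | cons c cs ih =>
    intro s o1 o2
    rw [PySem.List.enumerate_cons, List.foldl_cons]
    by_cases hc : PySem.Chars.isupper c
    · have hstep : pvStepA (o1, o2) (s, c) =
          ((match o1 with | none => some s | some x => some x), some s) := by
        simp [pvStepA, hc]
      rw [hstep, ih, Prod.mk.injEq]
      constructor
      · cases o1 <;> simp [List.findIdx?_cons, hc]
      · cases hcs : pvLub cs with
        | some k => simp [pvLub, hcs]; push_cast; ring
        | none => simp [pvLub, hcs, hc]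
    · have hstep : pvStepA (o1, o2) (s, c) = (o1, o2) := by
        simp [pvStepA, hc]
      rw [hstep, ih, Prod.mk.injEq]
      constructor
      · cases o1 with
        | some x => simp
        | none =>
          simp only [List.findIdx?_cons, hc]
          cases cs.findIdx? PySem.Chars.isupper <;> simp <;> push_cast <;> ring
      · cases hcs : pvLub cs with
        | some k => simp [pvLub, hcs]; push_cast; ring
        | none => simp [pvLub, hcs, hc]

theorem pvSumRange (l : List Char) (k : Nat) : ∀ (a : Nat), a + k ≤ l.length →
    ((PySem.List.pyRange (a : Int) ((a + k : Nat) : Int) 1).map (fun i =>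
        if PySem.Chars.islower (PySem.List.pyGetD l i ' ') then (1:Int) else 0)).sum
      = (((l.drop a).take k).countP PySem.Chars.islower : Int) := by
  induction k with
  | zero => intro a _; simp [PySem.List.pyRange_one_eq_nil]
  | succ k ih =>
    intro a hb
    have ha : a < l.length := by omega
    have h1 : ((a : Int)) < ((a + (k+1) : Nat) : Int) := by push_cast; omega
    rw [PySem.List.pyRange_one_cons h1, List.map_cons, List.sum_cons]
    have h2 : ((a : Int)) + 1 = (((a+1 : Nat)) : Int) := by push_cast; ring
    have h3 : ((a + (k+1) : Nat) : Int) = (((a+1) + k : Nat) : Int) := by push_cast; ring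
    rw [h2, h3, ih (a+1) (by omega)]
    rw [List.drop_eq_getElem_cons ha, List.take_succ_cons, List.countP_cons]
    have h4 : PySem.List.pyGetD l ((a : Nat) : Int) ' ' = l[a] := by
      rw [PySem.List.pyGetD_natCast]; exact (List.getD_eq_getElem l ' ' ha)
    rw [h4]
    by_cases hl : PySem.Chars.islower l[a] <;> simp [hl] <;> push_cast <;> ring

theorem pvHelper_eq (l : List Char) : ∀ (acc : Int),
    pvLowerBeforeUpper l acc =
      if l.any PySem.Chars.isupper then
        acc + ((l.takeWhile (fun c => !PySem.Chars.isupper c)).countP PySem.Chars.islower : Int)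
      else 0 := by
  induction l with
  | nil => intro acc; simp [pvLowerBeforeUpper]
  | cons c cs ih =>
    intro acc
    by_cases hc : PySem.Chars.isupper c
    · simp [pvLowerBeforeUpper, hc]
    · rw [pvLowerBeforeUpper, if_neg (by simp [hc]), ih]
      simp only [List.any_cons, Bool.false_or, List.takeWhile_cons, hc]
      by_cases hany : cs.any PySem.Chars.isupper = true
      · simp only [hany, if_pos]
        by_cases hl : PySem.Chars.islower c <;> simp [hl, hc] <;> push_cast <;> ring
      · simp [hany]

theorem pvFindIdx?_some (p : Char → Bool) (l : List Char) : ∀ (k : Nat), l.findIdx? p = some k →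
    k < l.length ∧ l.take k = l.takeWhile (fun c => !p c) ∧ l.any p = true := by
  induction l with
  | nil => intro k h; simp at h
  | cons c cs ih =>
    intro k h
    rw [List.findIdx?_cons] at h
    by_cases hc : p c
    · simp [hc] at h
      subst h
      simp [List.takeWhile_cons, hc]
    · simp [hc] at h
      obtain ⟨k', hk', rfl⟩ := h
      obtain ⟨h1, h2, h3⟩ := ih k' hk'
      refine ⟨by simpa using h1, ?_, by simp [h3]⟩
      simp [List.take_succ_cons, List.takeWhile_cons, hc, h2]

theorem pvTakeWhile_append_of_any (p : Char → Bool) (xs ys : List Char) (h : xs.any (fun c => !p c) = true) :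
    (xs ++ ys).takeWhile p = xs.takeWhile p := by
  induction xs with
  | nil => simp at h
  | cons c cs ih =>
    by_cases hc : p c
    · simp only [List.any_cons, hc, Bool.not_true, Bool.false_or] at h
      simp [List.takeWhile_cons, hc, ih h]
    · simp [List.takeWhile_cons, hc]

theorem pvTakeWhile_append_of_all (p : Char → Bool) (xs ys : List Char) (h : ∀ c ∈ xs, p c = true) :
    (xs ++ ys).takeWhile p = xs ++ ys.takeWhile p := by
  induction xs with
  | nil => simp
  | cons c cs ih =>
    have hc := h c (by simp)
    simp only [List.cons_append, List.takeWhile_cons, hc, if_pos]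
    rw [ih (fun d hd => h d (by simp [hd]))]

theorem pvLub_some (l : List Char) : ∀ (k : Nat), pvLub l = some k →
    k < l.length ∧ l.drop (k + 1) =
      (l.reverse.takeWhile (fun c => !PySem.Chars.isupper c)).reverse ∧
      l.any PySem.Chars.isupper = true := by
  induction l with
  | nil => intro k h; simp [pvLub] at h
  | cons c cs ih =>
    intro k h
    simp only [pvLub] at h
    cases hcs : pvLub cs with
    | some k' =>
      rw [hcs] at h
      simp at h
      obtain ⟨h1, h2, h3⟩ := ih k' hcs
      subst h
      refine ⟨by simpa using h1, ?_, by simp [h3]⟩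
      have hup : cs.reverse.any (fun c => !(!PySem.Chars.isupper c)) = true := by
        simpa using h3
      rw [List.drop_succ_cons, h2, List.reverse_cons,
        pvTakeWhile_append_of_any _ _ _ hup]
    | none =>
      rw [hcs] at h
      have hany : cs.any PySem.Chars.isupper = false := (pvLub_none_iff cs).1 hcs
      by_cases hc : PySem.Chars.isupper c
      · simp [hc] at h
        subst h
        refine ⟨by simp, ?_, by simp [hc]⟩
        have hall : ∀ d ∈ cs.reverse, (!PySem.Chars.isupper d) = true := by
          intro d hd
          simp only [List.mem_reverse] at hd
          simp only [List.any_eq_false] at hany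
          simp [hany d hd]
        rw [List.drop_succ_cons, List.drop_zero, List.reverse_cons,
          pvTakeWhile_append_of_all _ _ _ hall]
        simp [List.takeWhile_cons, hc]
      · simp [hc] at h

-- ===== VERDICT (by name: the statement is the Claim_ definition above) =====
theorem flanking_lower_positions_spec : Claim_equal_flanking_lower_positions := by
  intro string _
  unfold Spec_flanking_lower_positions
  simp only [flanking_lower_positions, flanking_lower_positions_alt]
  rw [pvFoldA, Prod.mk.injEq]
  set l := string.toList with hl
  constructor
  · -- left component
    cases hf : l.findIdx? PySem.Chars.isupper with
    | none =>
      have hany : l.any PySem.Chars.isupper = false := by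
        rw [List.findIdx?_eq_none_iff] at hf
        simp only [List.any_eq_false]
        intro x hx; simpa using hf x hx
      rw [pvHelper_eq, hany]
      simp
    | some k =>
      obtain ⟨h1, h2, h3⟩ := pvFindIdx?_some _ l k hf
      have hs := pvSumRange l k 0 (by omega)
      simp only [Nat.cast_zero, Nat.zero_add, List.drop_zero] at hs
      simp only [Option.map_some, zero_add]
      rw [hs, h2, pvHelper_eq, h3]
      simp
  · -- right component
    cases hlu : pvLub l with
    | none =>
      rw [pvHelper_eq]
      simp [List.any_reverse, (pvLub_none_iff l).1 hlu]
    | some k =>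
      obtain ⟨h1, h2, h3⟩ := pvLub_some l k hlu
      have hs := pvSumRange l (l.length - (k+1)) (k+1) (by omega)
      have hlen : ((k+1) + (l.length - (k+1)) : Nat) = l.length := by omega
      rw [hlen] at hs
      have htake : (l.drop (k+1)).take (l.length - (k+1)) = l.drop (k+1) :=
        List.take_of_length_le (by simp)
      rw [htake, h2] at hs
      have hcast : (0:Int) + (k:Int) + 1 = ((k+1 : Nat) : Int) := by push_cast; ring
      simp only [zero_add]
      rw [show ((k:Int)) + 1 = ((k+1 : Nat) : Int) by push_cast; ring, hs, pvHelper_eq]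
      have hrev : l.reverse.any PySem.Chars.isupper = true := by
        simp [List.any_reverse, h3]
      rw [hrev]
      simp [List.countP_reverse]
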